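-- pv_equiv track=rewrite | github.com/Iggybot6/MAT_211 | Cipher.py | stripper
-- ===== SOURCE A (Python) =====
-- def stripper(dirtyStr):
--     """
--     This function strips any non-alphabet(except spaces) characters out of a string
--     It returns the string stripped of non-alphabet charactors(except spaces), and a list of the stipped out charactors.
--     """
--     stripped = ""  # this string is where the stripped string is stored
--     stripees = []  # this list is where the stripped out characters are stored
--     for char in range(len(dirtyStr)):
--         if not (91 <= ord(dirtyStr[char]) <= 96) and (65 <= ord(dirtyStr[char]) <= 122 or ord(dirtyStr[char]) == 32):
--             stripped += dirtyStr[char]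
--         else:
--             stripees += dirtyStr[char]
--     return stripped # the return for stripees was removed as it is not needed in this application.
-- ===== SOURCE B (Python) =====
-- import re
--
-- def stripper(dirtyStr):
--     return re.sub(r'[^A-Za-z ]', '', dirtyStr)
-- ===== Notes on version B (the rewrite author's own statement) =====
-- stated objective: idiomatic
-- what changed: Replaced the manual index loop with ord-range tests and quadratic string concatenation by a single compiled-regex substitution that deletes every character outside A-Za-z and space; the unused stripees accumulator disappears.
import Mathlib
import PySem

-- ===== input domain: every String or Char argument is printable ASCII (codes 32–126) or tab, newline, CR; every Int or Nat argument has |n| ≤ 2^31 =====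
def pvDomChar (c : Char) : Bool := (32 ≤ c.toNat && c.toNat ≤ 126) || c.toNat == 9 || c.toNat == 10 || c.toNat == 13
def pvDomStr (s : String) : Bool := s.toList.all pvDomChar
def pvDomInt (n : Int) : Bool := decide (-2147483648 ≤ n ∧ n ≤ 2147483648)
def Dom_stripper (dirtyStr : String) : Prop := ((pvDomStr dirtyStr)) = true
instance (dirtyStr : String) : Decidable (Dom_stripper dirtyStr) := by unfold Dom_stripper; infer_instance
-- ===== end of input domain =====

-- B replaces A's manual index loop with ord-range tests by a single regex substitution
-- re.sub(r'[^A-Za-z ]', '', s); objective: idiomatic.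

-- ===== PORT A =====
def stripper (dirtyStr : String) : String :=
  -- dirtyStr[char] is PySem.List.pyGetD dirtyStr.toList i ' ' (the index from range(len) is always in range)
  String.mk
    (((PySem.List.pyRange 0 (dirtyStr.toList.length : Int) 1).foldl
      (fun (st : List Char × List Char) i =>
        if (¬ (91 ≤ (PySem.List.pyGetD dirtyStr.toList i ' ').toNat ∧ (PySem.List.pyGetD dirtyStr.toList i ' ').toNat ≤ 96)) ∧
           (65 ≤ (PySem.List.pyGetD dirtyStr.toList i ' ').toNat ∧ (PySem.List.pyGetD dirtyStr.toList i ' ').toNat ≤ 122 ∨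
            (PySem.List.pyGetD dirtyStr.toList i ' ').toNat = 32)
        then (st.1 ++ [PySem.List.pyGetD dirtyStr.toList i ' '], st.2)      -- stripped += s[i]
        else (st.1, st.2 ++ [PySem.List.pyGetD dirtyStr.toList i ' ']))    -- stripees += s[i]
      (([] : List Char), ([] : List Char))).1)

-- ===== PORT B =====
-- re.sub(r'[^A-Za-z ]', '', s) = keep exactly the characters matching [A-Za-z ]
def stripper_alt (dirtyStr : String) : String :=
  String.mk (dirtyStr.toList.filter fun c =>
    ('A' ≤ c && c ≤ 'Z') || ('a' ≤ c && c ≤ 'z') || c == ' ')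

-- ===== PRECONDITION & SPEC =====
def Spec_stripper (dirtyStr : String) (out : String) : Prop := out = stripper_alt dirtyStr
instance (dirtyStr : String) (out : String) : Decidable (Spec_stripper dirtyStr out) := by unfold Spec_stripper; infer_instance

-- ===== CLAIM (what is proved, stated in full; the proofs are below) =====
def Claim_equal_stripper : Prop := ∀ (dirtyStr : String), Dom_stripper dirtyStr → Spec_stripper dirtyStr (stripper dirtyStr)

-- ===== LEMMAS AND PROOFS =====

-- per character, A's ord-band test agrees with B's [A-Za-z ] test
lemma stripper_pred_eq (c : Char) :
    decide ((¬ (91 ≤ c.toNat ∧ c.toNat ≤ 96)) ∧ (65 ≤ c.toNat ∧ c.toNat ≤ 122 ∨ c.toNat = 32))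
    = (('A' ≤ c && c ≤ 'Z') || ('a' ≤ c && c ≤ 'z') || c == ' ') := by
  have hA : ('A' ≤ c) ↔ 65 ≤ c.toNat := by
    rw [Char.le_def, UInt32.le_iff_toNat_le]; exact Iff.rfl
  have hZ : (c ≤ 'Z') ↔ c.toNat ≤ 90 := by
    rw [Char.le_def, UInt32.le_iff_toNat_le]; exact Iff.rfl
  have ha : ('a' ≤ c) ↔ 97 ≤ c.toNat := by
    rw [Char.le_def, UInt32.le_iff_toNat_le]; exact Iff.rfl
  have hz : (c ≤ 'z') ↔ c.toNat ≤ 122 := by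
    rw [Char.le_def, UInt32.le_iff_toNat_le]; exact Iff.rfl
  have hs : (c = ' ') ↔ c.toNat = 32 := by
    constructor
    · intro h; rw [h]; rfl
    · intro h
      apply Char.ext
      apply UInt32.toNat_inj.mp
      simpa using h
  rw [Bool.eq_iff_iff]
  simp only [decide_eq_true_eq, Bool.or_eq_true, Bool.and_eq_true, decide_eq_true_eq,
    beq_iff_eq, hA, hZ, ha, hz, hs]
  omega

-- the first accumulator of A's loop is the filter by A's test
lemma stripper_loop_eq (cs : List Char) (a1 a2 : List Char) :
    (cs.foldl
      (fun (st : List Char × List Char) c =>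
        if (¬ (91 ≤ c.toNat ∧ c.toNat ≤ 96)) ∧ (65 ≤ c.toNat ∧ c.toNat ≤ 122 ∨ c.toNat = 32)
        then (st.1 ++ [c], st.2)
        else (st.1, st.2 ++ [c]))
      (a1, a2)).1
    = a1 ++ cs.filter (fun c =>
        decide ((¬ (91 ≤ c.toNat ∧ c.toNat ≤ 96)) ∧ (65 ≤ c.toNat ∧ c.toNat ≤ 122 ∨ c.toNat = 32))) := by
  induction cs generalizing a1 a2 with
  | nil => simp
  | cons c t ih =>
    simp only [List.foldl_cons, List.filter_cons]
    by_cases h : (¬ (91 ≤ c.toNat ∧ c.toNat ≤ 96)) ∧ (65 ≤ c.toNat ∧ c.toNat ≤ 122 ∨ c.toNat = 32)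
    · rw [if_pos h, ih]
      simp [h]
    · rw [if_neg h, ih]
      simp
      omega

-- ===== VERDICT (by name: the statement is the Claim_ definition above) =====
theorem stripper_spec : Claim_equal_stripper := by
  intro s _
  unfold Spec_stripper stripper stripper_alt
  rw [PySem.List.foldl_pyRange_zero_pyGetD' s.toList ' '
    (fun (st : List Char × List Char) c =>
      if (¬ (91 ≤ c.toNat ∧ c.toNat ≤ 96)) ∧ (65 ≤ c.toNat ∧ c.toNat ≤ 122 ∨ c.toNat = 32)
      then (st.1 ++ [c], st.2)
      else (st.1, st.2 ++ [c]))
    (([] : List Char), ([] : List Char))]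
  rw [stripper_loop_eq, List.nil_append,
    List.filter_congr (fun c _ => stripper_pred_eq c)]
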